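-- pv_equiv track=rewrite | github.com/hebstr/litrev | scripts/extract_data.py | deduplicate_keys
-- ===== SOURCE A (Python) =====
-- def deduplicate_keys(keys: list[str]) -> list[str]:
--     counts: dict[str, int] = {}
--     for k in keys:
--         counts[k] = counts.get(k, 0) + 1
--
--     duplicates = {k for k, v in counts.items() if v > 1}
--     if not duplicates:
--         return keys
--
--     suffix_counters: dict[str, int] = {}
--     result = []
--     for k in keys:
--         if k in duplicates:
--             suffix_counters[k] = suffix_counters.get(k, 0) + 1
--             result.append(f"{k}{chr(96 + suffix_counters[k])}")
--         else:
--             result.append(k)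
--     return result
-- ===== SOURCE B (Python) =====
-- def deduplicate_keys(keys: list[str]) -> list[str]:
--     positions: dict[str, list[int]] = {}
--     for i, k in enumerate(keys):
--         positions.setdefault(k, []).append(i)
--     if all(len(v) == 1 for v in positions.values()):
--         return keys
--     result = list(keys)
--     for k, idxs in positions.items():
--         if len(idxs) > 1:
--             for n, i in enumerate(idxs, 1):
--                 result[i] = f"{k}{chr(96 + n)}"
--     return result
-- ===== Notes on version B (the rewrite author's own statement) =====
-- stated objective: alternative
-- what changed: Replaces A's single streaming pass with per-key suffix counters by a group-by scatter: one pass builds a positions index (key -> list of indices), then result starts as a copy of keys and each duplicated key's occurrences are overwritten group by group at their recorded indices.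
import Mathlib
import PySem

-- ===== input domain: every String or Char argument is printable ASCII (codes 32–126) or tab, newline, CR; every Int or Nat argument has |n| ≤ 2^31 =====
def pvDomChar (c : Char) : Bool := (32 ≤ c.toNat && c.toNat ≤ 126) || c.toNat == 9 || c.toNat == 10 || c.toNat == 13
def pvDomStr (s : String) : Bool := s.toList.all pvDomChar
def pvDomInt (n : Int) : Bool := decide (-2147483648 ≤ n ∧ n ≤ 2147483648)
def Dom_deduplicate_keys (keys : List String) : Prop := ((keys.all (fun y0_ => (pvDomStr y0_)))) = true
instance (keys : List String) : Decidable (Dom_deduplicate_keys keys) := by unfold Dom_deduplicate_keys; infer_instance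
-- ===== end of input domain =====

-- B replaces A's single streaming pass (per-key suffix counters) by a group-by scatter over a
-- positions index (key -> list of indices); same return value, alternative structure.

-- ===== PORT A =====
-- chr(96 + n) for small positive n — shared chr helper (Char.ofNat is exact below 0x110000)
def pvMkSuffix (n : Nat) : String := String.ofList [Char.ofNat n]

-- counts[k] = counts.get(k, 0) + 1 over keys
def pvCounts (keys : List String) : PySem.Dict String Int :=
  keys.foldl (fun d k => d.insert k (d.getD k 0 + 1)) PySem.Dict.empty

-- duplicates = {k for k, v in counts.items() if v > 1}  (consumed only via emptiness/membership)
def pvDuplicates (keys : List String) : PySem.Set String :=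
  PySem.Set.ofList (((pvCounts keys).items.filter (fun kv => decide (1 < kv.2))).map (fun kv => kv.1))

def deduplicate_keys (keys : List String) : List String :=
  if (pvDuplicates keys).isEmpty then keys
  else
    (keys.foldl
      (fun (st : PySem.Dict String Int × List String) k =>
        if PySem.Set.contains (pvDuplicates keys) k then
          (st.1.insert k (st.1.getD k 0 + 1),
           st.2 ++ [k ++ pvMkSuffix (96 + (st.1.getD k 0 + 1)).toNat])
        else (st.1, st.2 ++ [k]))
      (PySem.Dict.empty, [])).2

-- ===== PORT B =====
-- positions.setdefault(k, []).append(i) over enumerate(keys)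
def pvPositions (keys : List String) : PySem.Dict String (List Int) :=
  (PySem.List.enumerate keys).foldl (fun d ik => d.modify ik.2 [] (· ++ [ik.1])) PySem.Dict.empty

def deduplicate_keys_alt (keys : List String) : List String :=
  if (pvPositions keys).values.all (fun v => v.length == 1) then keys
  else
    -- result = list(keys); scatter each duplicated group's suffixed names at its recorded indices
    (pvPositions keys).items.foldl
      (fun res kv =>
        if 1 < kv.2.length then
          (PySem.List.enumerate kv.2 1).foldl
            (fun r ni => r.set ni.2.toNat (kv.1 ++ pvMkSuffix (96 + ni.1).toNat)) res
        else res)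
      keys

-- ===== PRECONDITION & SPEC =====
def Spec_deduplicate_keys (keys : List String) (out : List String) : Prop := out = deduplicate_keys_alt keys
instance (keys : List String) (out : List String) : Decidable (Spec_deduplicate_keys keys out) := by unfold Spec_deduplicate_keys; infer_instance

-- ===== CLAIM (what is proved, stated in full; the proofs are below) =====
def Claim_equal_deduplicate_keys : Prop := ∀ (keys : List String), Dom_deduplicate_keys keys → Spec_deduplicate_keys keys (deduplicate_keys keys)

-- ===== LEMMAS AND PROOFS =====

-- the common pointwise description of the renamed list (A's loop produces it; B agrees with it pointwise)
def dedupSpec (keys : List String) (pre : List String) : List String → List String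
  | [] => []
  | k :: suf =>
      (if 1 < keys.count k then k ++ pvMkSuffix (97 + pre.count k) else k)
        :: dedupSpec keys (pre ++ [k]) suf

lemma mem_pvDuplicates (keys : List String) (x : String) :
    x ∈ pvDuplicates keys ↔ x ∈ keys ∧ 1 < keys.count x := by
  have h : pvCounts keys = PySem.Dict.counter keys :=
    PySem.Dict.foldl_insert_getD_add_one_eq_counter keys
  simp [pvDuplicates, h, PySem.Dict.items_counter, PySem.Set.mem_ofList,
    List.mem_filter, List.mem_map]

lemma Aloop (keys : List String) :
    ∀ (suf pre : List String) (sc : PySem.Dict String Int) (acc : List String),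
      keys = pre ++ suf →
      (∀ x, 1 < keys.count x → sc.getD x 0 = (pre.count x : Int)) →
      (suf.foldl
        (fun (st : PySem.Dict String Int × List String) k =>
          if PySem.Set.contains (pvDuplicates keys) k then
            (st.1.insert k (st.1.getD k 0 + 1),
             st.2 ++ [k ++ pvMkSuffix (96 + (st.1.getD k 0 + 1)).toNat])
          else (st.1, st.2 ++ [k]))
        (sc, acc)).2 = acc ++ dedupSpec keys pre suf := by
  intro suf
  induction suf with
  | nil => intro pre sc acc h hinv; simp [dedupSpec]
  | cons k suf ih =>
    intro pre sc acc h hinv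
    have hkmem : k ∈ keys := by rw [h]; simp
    rw [List.foldl_cons, dedupSpec]
    by_cases hk : 1 < keys.count k
    · have hc : PySem.Set.contains (pvDuplicates keys) k = true := by
        rw [PySem.Set.contains_iff, mem_pvDuplicates]; exact ⟨hkmem, hk⟩
      rw [hc, if_pos rfl]
      have hg := hinv k hk
      have hchr : (96 + (sc.getD k 0 + 1)).toNat = 97 + pre.count k := by
        rw [hg]; omega
      have h' : keys = (pre ++ [k]) ++ suf := by simpa using h
      have hinv' : ∀ x, 1 < keys.count x →
          (sc.insert k (sc.getD k 0 + 1)).getD x 0 = ((pre ++ [k]).count x : Int) := by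
        intro x hx
        rw [PySem.Dict.getD_insert]
        by_cases hxk : x = k
        · subst hxk
          rw [if_pos rfl, hg]
          simp [List.count_append]
        · rw [if_neg hxk, hinv x hx]
          have : [k].count x = 0 := by
            simp [List.count_singleton]
            exact fun hkx => hxk hkx.symm
          simp [List.count_append, this]
      have := ih (pre ++ [k]) (sc.insert k (sc.getD k 0 + 1))
        (acc ++ [k ++ pvMkSuffix (96 + (sc.getD k 0 + 1)).toNat]) h' hinv'
      rw [this, hchr]
      simp [if_pos hk]
    · have hc : PySem.Set.contains (pvDuplicates keys) k = false := by
        rw [← Bool.not_eq_true, PySem.Set.contains_iff, mem_pvDuplicates]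
        exact fun hm => hk hm.2
      rw [hc]
      simp only [Bool.false_eq_true, if_false]
      have h' : keys = (pre ++ [k]) ++ suf := by simpa using h
      have hinv' : ∀ x, 1 < keys.count x →
          sc.getD x 0 = ((pre ++ [k]).count x : Int) := by
        intro x hx
        have hxk : x ≠ k := fun hxe => hk (hxe ▸ hx)
        have : [k].count x = 0 := by
          simp [List.count_singleton]
          exact fun hkx => hxk hkx.symm
        rw [hinv x hx]
        simp [List.count_append, this]
      have := ih (pre ++ [k]) sc (acc ++ [k]) h' hinv'
      rw [this]
      simp [if_neg hk]

-- pointwise reading of dedupSpec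
lemma dedupSpec_get? (keys : List String) :
    ∀ (suf pre : List String) (i : Nat),
      (dedupSpec keys pre suf)[i]? =
        (suf[i]?).map (fun k =>
          if 1 < keys.count k then k ++ pvMkSuffix (97 + pre.count k + (suf.take i).count k) else k) := by
  intro suf
  induction suf with
  | nil => intro pre i; simp [dedupSpec]
  | cons k0 suf ih =>
    intro pre i
    cases i with
    | zero => simp [dedupSpec]
    | succ i =>
      rw [dedupSpec]
      simp only [List.getElem?_cons_succ, List.take_succ_cons]
      rw [ih (pre ++ [k0]) i]
      cases h : suf[i]? with
      | none => simp
      | some k =>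
        simp only [Option.map_some]
        congr 1
        by_cases hk : 1 < keys.count k
        · rw [if_pos hk, if_pos hk]
          congr 2
          simp [List.count_append, List.count_cons]
          omega
        · rw [if_neg hk, if_neg hk]

-- ---- B side: the positions index ----

-- the list of indices (from start s) at which k occurs
def posFrom (keys : List String) (s : Int) (k : String) : List Int :=
  ((PySem.List.enumerate keys s).filter (fun p => p.2 == k)).map (·.1)

lemma posFrom_nil (s : Int) (k : String) : posFrom [] s k = [] := rfl

lemma posFrom_cons (a : String) (t : List String) (s : Int) (k : String) :
    posFrom (a :: t) s k = if a == k then s :: posFrom t (s + 1) k else posFrom t (s + 1) k := by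
  simp only [posFrom, PySem.List.enumerate_cons, List.filter_cons]
  by_cases h : a == k
  · simp [h]
  · simp [h]

lemma posFrom_length (k : String) :
    ∀ (keys : List String) (s : Int), (posFrom keys s k).length = keys.count k := by
  intro keys
  induction keys with
  | nil => intro s; simp [posFrom_nil]
  | cons a t ih =>
    intro s
    rw [posFrom_cons, List.count_cons]
    by_cases h : a == k
    · simp [h, ih]
    · simp [h, ih]

lemma posFrom_spec (k : String) :
    ∀ (keys : List String) (s : Int) (m : Nat), m < (posFrom keys s k).length →
      ∃ j : Nat, j < keys.length ∧ (posFrom keys s k)[m]? = some (s + j) ∧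
        keys[j]? = some k ∧ (keys.take j).count k = m := by
  intro keys
  induction keys with
  | nil => intro s m h; simp [posFrom_nil] at h
  | cons a t ih =>
    intro s m h
    by_cases ha : a == k
    · have hpf : posFrom (a :: t) s k = s :: posFrom t (s + 1) k := by
        rw [posFrom_cons, if_pos ha]
      rw [hpf] at h ⊢
      cases m with
      | zero =>
        refine ⟨0, by simp, by simp, ?_, by simp⟩
        simp [show a = k from by simpa using ha]
      | succ m =>
        have h' : m < (posFrom t (s + 1) k).length := by simpa using h
        obtain ⟨j, hj, hv, hg, hcnt⟩ := ih (s + 1) m h'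
        refine ⟨j + 1, by simpa using hj, ?_, by simpa using hg, ?_⟩
        · rw [List.getElem?_cons_succ, hv]
          congr 1
          push_cast
          ring
        · have hak : a = k := by simpa using ha
          subst hak
          simp [hcnt]
    · have hpf : posFrom (a :: t) s k = posFrom t (s + 1) k := by
        rw [posFrom_cons, if_neg (by simpa using ha)]
      rw [hpf] at h ⊢
      obtain ⟨j, hj, hv, hg, hcnt⟩ := ih (s + 1) m h
      refine ⟨j + 1, by simpa using hj, ?_, by simpa using hg, ?_⟩
      · rw [hv]
        congr 1
        push_cast
        ring
      · have hak : ¬ (a = k) := by simpa using ha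
        have hka : ¬ (k = a) := fun he => hak he.symm
        simp [hcnt, hak]

-- a position of k is determined by the number of earlier occurrences of k
lemma take_count_inj (keys : List String) (k : String) :
    ∀ (j j' : Nat), keys[j]? = some k → keys[j']? = some k →
      (keys.take j).count k = (keys.take j').count k → j = j' := by
  have key : ∀ (j j' : Nat), j < j' → keys[j]? = some k →
      (keys.take j).count k < (keys.take j').count k := by
    intro j j' hlt hj
    have hjlen : j < keys.length := (List.getElem?_eq_some_iff.mp hj).1
    have hstep : (keys.take (j + 1)).count k = (keys.take j).count k + 1 := by
      rw [List.take_add_one, hj]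
      simp [List.count_append]
    have hmono : (keys.take (j + 1)).count k ≤ (keys.take j').count k :=
      (List.take_prefix_take_left (by omega : j + 1 ≤ j') (l := keys)).sublist.count_le k
    omega
  intro j j' hj hj' hc
  rcases lt_trichotomy j j' with h | h | h
  · exact absurd hc (by have := key j j' h hj; omega)
  · exact h
  · exact absurd hc (by have := key j' j h hj'; omega)

-- positions dict: lookup, keys
lemma pvPositions_getD (keys : List String) (k : String) :
    (pvPositions keys).getD k [] = posFrom keys 0 k := by
  unfold pvPositions
  have hswap : ∀ (l : List (Int × String)) (d : PySem.Dict String (List Int)),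
      l.foldl (fun d ik => d.modify ik.2 [] (· ++ [ik.1])) d
        = (l.map (fun ik => (ik.2, ik.1))).foldl (fun d p => d.modify p.1 [] (· ++ [p.2])) d := by
    intro l
    induction l with
    | nil => intro d; rfl
    | cons p t ih => intro d; simp only [List.foldl_cons, List.map_cons]; exact ih _
  rw [hswap]
  rw [PySem.Dict.getD_foldl_modify_append]
  simp only [PySem.Dict.getD_empty, List.nil_append, posFrom]
  rw [List.filter_map, List.map_map]
  rfl

lemma pvPositions_keys (keys : List String) :
    (pvPositions keys).keys = PySem.Set.ofList keys := by
  unfold pvPositions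
  rw [PySem.Dict.keys_foldl_modify_key]
  rw [PySem.List.map_snd_enumerate]
  rfl

lemma pvPositions_keys_nodup (keys : List String) : (pvPositions keys).keys.Nodup := by
  apply PySem.Dict.nodup_keys_foldl_modify_key
  simp

lemma pvPositions_items (keys : List String) :
    (pvPositions keys).items = (PySem.Set.ofList keys).map (fun k => (k, posFrom keys 0 k)) := by
  rw [PySem.Dict.items_eq_map_keys (pvPositions keys) (pvPositions_keys_nodup keys) []]
  rw [pvPositions_keys]
  exact List.map_congr_left (fun k _ => by rw [pvPositions_getD])

-- the flat list of (index, new name) writes B performs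
def pvUpdates (keys : List String) : List (Nat × String) :=
  ((pvPositions keys).items.filter (fun kv => decide (1 < kv.2.length))).flatMap
    (fun kv => (PySem.List.enumerate kv.2 1).map
      (fun ni => (ni.2.toNat, kv.1 ++ pvMkSuffix (96 + ni.1).toNat)))

lemma mem_pvUpdates (keys : List String) (j : Nat) (v : String) :
    (j, v) ∈ pvUpdates keys ↔
      ∃ k, keys[j]? = some k ∧ 1 < keys.count k ∧
        v = k ++ pvMkSuffix (97 + (keys.take j).count k) := by
  constructor
  · intro hm
    rw [pvUpdates, List.mem_flatMap] at hm
    obtain ⟨kv, hkv, hmm⟩ := hm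
    rw [List.mem_filter] at hkv
    obtain ⟨hkv, hlen⟩ := hkv
    rw [pvPositions_items, List.mem_map] at hkv
    obtain ⟨k, hkmem, rfl⟩ := hkv
    simp only [decide_eq_true_eq] at hlen
    rw [List.mem_map] at hmm
    obtain ⟨ni, hni, hpair⟩ := hmm
    rw [PySem.List.mem_enumerate_iff] at hni
    obtain ⟨m, hm, rfl⟩ := hni
    obtain ⟨j', hj', hv, hg, hcnt⟩ := posFrom_spec k keys 0 m hm
    have hv' : (posFrom keys 0 k)[m] = 0 + (j' : Int) := by
      have := List.getElem?_eq_getElem hm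
      rw [this] at hv
      exact Option.some.inj hv
    simp only at hpair
    have hj : j = j' := by
      have := congrArg Prod.fst hpair
      simp [hv'] at this
      omega
    subst hj
    refine ⟨k, hg, by rwa [posFrom_length] at hlen, ?_⟩
    have hvv := congrArg Prod.snd hpair
    simp only at hvv
    have h2 : (96 + (1 + (m : Int))).toNat = 97 + m := by omega
    rw [← hvv, h2, hcnt]
  · rintro ⟨k, hg, hdup, rfl⟩
    have hjlen : j < keys.length := (List.getElem?_eq_some_iff.mp hg).1
    set m := (keys.take j).count k with hm
    have hmlt : m < (posFrom keys 0 k).length := by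
      rw [posFrom_length]
      have hsplit : keys.count k = (keys.take (j + 1)).count k + (keys.drop (j + 1)).count k := by
        rw [← List.count_append, List.take_append_drop]
      have hstep : (keys.take (j + 1)).count k = m + 1 := by
        rw [List.take_add_one, hg]
        simp [List.count_append, hm]
      omega
    obtain ⟨j', hj', hv, hg', hcnt⟩ := posFrom_spec k keys 0 m hmlt
    have hv' : (posFrom keys 0 k)[m] = 0 + (j' : Int) := by
      have := List.getElem?_eq_getElem hmlt
      rw [this] at hv
      exact Option.some.inj hv
    have hjj : j' = j := take_count_inj keys k j' j hg' hg (by rw [hcnt])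
    subst hjj
    rw [pvUpdates, List.mem_flatMap]
    refine ⟨(k, posFrom keys 0 k), ?_, ?_⟩
    · rw [List.mem_filter]
      constructor
      · rw [pvPositions_items, List.mem_map]
        refine ⟨k, ?_, rfl⟩
        rw [PySem.Set.mem_ofList]
        exact List.mem_of_getElem? hg
      · rw [posFrom_length]
        simpa using hdup
    · rw [List.mem_map]
      refine ⟨(1 + m, (posFrom keys 0 k)[m]), ?_, ?_⟩
      · rw [PySem.List.mem_enumerate_iff]
        exact ⟨m, hmlt, rfl⟩
      · simp only [hv']
        have h1 : (0 + (j' : Int)).toNat = j' := by omega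
        have h2 : (96 + (1 + (m : Int))).toNat = 97 + m := by omega
        rw [h1, h2, hm]

-- B's scatter loop is the fold of the flat write list
lemma scatter_eq (keys : List String) :
    ((pvPositions keys).items.foldl
      (fun res kv =>
        if 1 < kv.2.length then
          (PySem.List.enumerate kv.2 1).foldl
            (fun r ni => r.set ni.2.toNat (kv.1 ++ pvMkSuffix (96 + ni.1).toNat)) res
        else res)
      keys) = (pvUpdates keys).foldl (fun r p => r.set p.1 p.2) keys := by
  rw [PySem.List.foldl_ite_eq_foldl_filter]
  rw [pvUpdates, List.foldl_flatMap]
  apply PySem.List.foldl_congr_mem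
  intro acc kv _
  rw [List.foldl_map]

-- fold of writes, read back pointwise (writes functional in the index, indices in range)
lemma foldl_set_get? :
    ∀ (ups : List (Nat × String)) (res : List String) (i : Nat),
      (∀ p ∈ ups, ∀ q ∈ ups, p.1 = q.1 → p.2 = q.2) →
      (∀ p ∈ ups, p.1 < res.length) →
      (ups.foldl (fun r p => r.set p.1 p.2) res)[i]? =
        match ups.find? (fun p => p.1 == i) with
        | some p => some p.2
        | none => res[i]? := by
  intro ups
  induction ups with
  | nil => intro res i _ _; simp
  | cons p t ih =>
    intro res i hfun hlt
    rw [List.foldl_cons, List.find?_cons]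
    have hfun' : ∀ a ∈ t, ∀ b ∈ t, a.1 = b.1 → a.2 = b.2 :=
      fun a ha b hb => hfun a (List.mem_cons_of_mem _ ha) b (List.mem_cons_of_mem _ hb)
    have hlt' : ∀ a ∈ t, a.1 < (res.set p.1 p.2).length := by
      intro a ha; rw [List.length_set]; exact hlt a (List.mem_cons_of_mem _ ha)
    rw [ih (res.set p.1 p.2) i hfun' hlt']
    by_cases hpi : p.1 = i
    · simp only [hpi, beq_self_eq_true]
      cases hf : t.find? (fun q => q.1 == i) with
      | some q =>
        have hq1 : q.1 = i := by simpa using List.find?_some hf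
        have hq2 : q.2 = p.2 :=
          hfun q (List.mem_cons_of_mem _ (List.mem_of_find?_eq_some hf))
            p List.mem_cons_self (by rw [hq1, hpi])
        simp [hq2]
      | none =>
        simp only
        subst hpi
        simp [hlt p List.mem_cons_self]
    · simp only [show (p.1 == i) = false from by simpa using hpi]
      cases hf : t.find? (fun q => q.1 == i) with
      | some q => rfl
      | none =>
        simp only
        rw [List.getElem?_set_ne hpi]

-- B's duplicate test reads the positions index
lemma values_all_iff (keys : List String) :
    ((pvPositions keys).values.all (fun v => v.length == 1)) = true ↔
      ∀ x ∈ keys, keys.count x ≤ 1 := by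
  have hv : (pvPositions keys).values
      = ((PySem.Set.ofList keys).map (fun k => (k, posFrom keys 0 k))).map (·.2) := by
    rw [← pvPositions_items]; rfl
  rw [hv]
  simp only [List.all_eq_true, List.map_map, List.mem_map]
  constructor
  · intro h x hx
    have := h ((fun k => (k, posFrom keys 0 k)) x |>.2) ⟨x, by rwa [PySem.Set.mem_ofList], rfl⟩
    have hlen : (posFrom keys 0 x).length = keys.count x := posFrom_length x keys 0
    simp only [beq_iff_eq] at this
    omega
  · intro h v hv'
    obtain ⟨x, hx, rfl⟩ := hv'
    rw [PySem.Set.mem_ofList] at hx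
    have h1 : 1 ≤ keys.count x := List.one_le_count_iff.mpr hx
    have := h x hx
    simp only [Function.comp_apply, beq_iff_eq]
    rw [posFrom_length]
    omega

-- ===== VERDICT (by name: the statement is the Claim_ definition above) =====
theorem deduplicate_keys_spec : Claim_equal_deduplicate_keys := by
  unfold Claim_equal_deduplicate_keys Spec_deduplicate_keys
  intro keys _
  rw [deduplicate_keys, deduplicate_keys_alt]
  by_cases hd : ∃ x ∈ keys, 1 < keys.count x
  · have hA : (pvDuplicates keys).isEmpty = false := by
      rw [← Bool.not_eq_true, List.isEmpty_iff]
      intro hnil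
      obtain ⟨x, hxm, hxc⟩ := hd
      have : x ∈ pvDuplicates keys := (mem_pvDuplicates keys x).2 ⟨hxm, hxc⟩
      rw [hnil] at this
      exact absurd this (List.not_mem_nil)
    have hB : ((pvPositions keys).values.all (fun v => v.length == 1)) = false := by
      rw [← Bool.not_eq_true]
      intro hall
      obtain ⟨x, hxm, hxc⟩ := hd
      have := (values_all_iff keys).1 hall x hxm
      omega
    rw [hA, hB]
    simp only [Bool.false_eq_true, if_false]
    have hAv := Aloop keys keys [] PySem.Dict.empty [] (by simp)
      (fun x _ => by simp [PySem.Dict.getD_empty])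
    rw [hAv, scatter_eq]
    simp only [List.nil_append]
    have hfun : ∀ p ∈ pvUpdates keys, ∀ q ∈ pvUpdates keys, p.1 = q.1 → p.2 = q.2 := by
      intro p hp q hq hpq
      obtain ⟨k1, hg1, _, hv1⟩ := (mem_pvUpdates keys p.1 p.2).1 hp
      obtain ⟨k2, hg2, _, hv2⟩ := (mem_pvUpdates keys q.1 q.2).1 hq
      rw [hpq] at hg1 hv1
      rw [hg2] at hg1
      cases Option.some.inj hg1
      rw [hv1, hv2]
    have hlt : ∀ p ∈ pvUpdates keys, p.1 < keys.length := by
      intro p hp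
      obtain ⟨k1, hg1, _, _⟩ := (mem_pvUpdates keys p.1 p.2).1 hp
      exact (List.getElem?_eq_some_iff.mp hg1).1
    apply List.ext_getElem?
    intro i
    rw [dedupSpec_get? keys keys [] i, foldl_set_get? (pvUpdates keys) keys i hfun hlt]
    cases hk : keys[i]? with
    | none =>
      cases hf : (pvUpdates keys).find? (fun p => p.1 == i) with
      | some p =>
        have hp1 : p.1 = i := by simpa using List.find?_some hf
        obtain ⟨k1, hg1, _, _⟩ := (mem_pvUpdates keys p.1 p.2).1 (List.mem_of_find?_eq_some hf)
        rw [hp1, hk] at hg1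
        exact absurd hg1.symm (Option.some_ne_none k1)
      | none => simp
    | some k =>
      by_cases hdupk : 1 < keys.count k
      · have hw : (i, k ++ pvMkSuffix (97 + (keys.take i).count k)) ∈ pvUpdates keys :=
          (mem_pvUpdates keys i _).2 ⟨k, hk, hdupk, rfl⟩
        cases hf : (pvUpdates keys).find? (fun p => p.1 == i) with
        | none =>
          have := List.find?_eq_none.mp hf _ hw
          simp at this
        | some p =>
          have hp1 : p.1 = i := by simpa using List.find?_some hf
          obtain ⟨k1, hg1, hd1, hv1⟩ := (mem_pvUpdates keys p.1 p.2).1 (List.mem_of_find?_eq_some hf)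
          rw [hp1, hk] at hg1
          cases Option.some.inj hg1
          rw [hp1] at hv1
          simp only [Option.map_some]
          rw [hv1]
          simp [hdupk]
      · cases hf : (pvUpdates keys).find? (fun p => p.1 == i) with
        | some p =>
          have hp1 : p.1 = i := by simpa using List.find?_some hf
          obtain ⟨k1, hg1, hd1, _⟩ := (mem_pvUpdates keys p.1 p.2).1 (List.mem_of_find?_eq_some hf)
          rw [hp1, hk] at hg1
          cases Option.some.inj hg1
          exact absurd hd1 hdupk
        | none => simp [hdupk]
  · push Not at hd
    have hA : (pvDuplicates keys).isEmpty = true := by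
      rw [List.isEmpty_iff, List.eq_nil_iff_forall_not_mem]
      intro a ha
      obtain ⟨ham, hac⟩ := (mem_pvDuplicates keys a).1 ha
      exact absurd hac (not_lt.2 (hd a ham))
    have hB : ((pvPositions keys).values.all (fun v => v.length == 1)) = true :=
      (values_all_iff keys).2 hd
    rw [hA, hB]
    simp
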